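-- pv_equiv track=rewrite | github.com/mrchukwu/python_course_exercise | 04_loops/parcel_scan_machine.py | scan_parcels
-- ===== SOURCE A (Python) =====
-- def scan_parcels(parcel_codes: list[str]) -> list[str]:
--     # Write your code below this line
--     scanned_parcel_mgs = []
--     for parcel_code in parcel_codes:
--         if parcel_code == "DAMAGED":
--             scanned_parcel_mgs.append("Skipped damaged parcel")
--             continue
--         if parcel_code == "STOP":
--             scanned_parcel_mgs.append("Critical error: Stopping scan")
--             break
--         scanned_parcel_mgs.append(f"Scanned parcel: {parcel_code}")
--     else:
--         scanned_parcel_mgs.append("All parcels scanned successfully")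
--     return scanned_parcel_mgs
-- ===== SOURCE B (Python) =====
-- def scan_parcels(parcel_codes: list[str]) -> list[str]:
--     try:
--         i = parcel_codes.index("STOP")
--         prefix, tail = parcel_codes[:i], ["Critical error: Stopping scan"]
--     except ValueError:
--         prefix, tail = parcel_codes, ["All parcels scanned successfully"]
--     body = ["Skipped damaged parcel" if c == "DAMAGED" else f"Scanned parcel: {c}"
--             for c in prefix]
--     return body + tail
-- ===== Notes on version B (the rewrite author's own statement) =====
-- stated objective: idiomatic
-- what changed: Replaces the stateful for/else loop with break by locating the STOP boundary via list.index, slicing the prefix, mapping it with a comprehension and appending one terminal line.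
import Mathlib
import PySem

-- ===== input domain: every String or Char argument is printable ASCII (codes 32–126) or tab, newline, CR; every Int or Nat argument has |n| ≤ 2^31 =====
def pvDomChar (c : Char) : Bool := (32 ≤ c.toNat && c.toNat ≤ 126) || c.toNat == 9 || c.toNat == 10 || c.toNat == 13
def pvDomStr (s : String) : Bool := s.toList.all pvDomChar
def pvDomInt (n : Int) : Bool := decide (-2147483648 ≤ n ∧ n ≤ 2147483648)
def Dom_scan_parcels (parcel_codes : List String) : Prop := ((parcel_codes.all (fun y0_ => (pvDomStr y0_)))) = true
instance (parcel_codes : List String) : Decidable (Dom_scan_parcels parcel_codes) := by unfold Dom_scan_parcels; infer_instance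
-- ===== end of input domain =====

-- ===== PORT A =====
-- B replaces A's for/else loop with index-of-STOP + slice + comprehension; return value only.
def scan_parcels_loop (codes : List String) : List String :=
  match codes with
  | [] => ["All parcels scanned successfully"]
  | c :: rest =>
    if c == "DAMAGED" then "Skipped damaged parcel" :: scan_parcels_loop rest
    else if c == "STOP" then ["Critical error: Stopping scan"]
    else ("Scanned parcel: " ++ c) :: scan_parcels_loop rest

def scan_parcels (parcel_codes : List String) : List String :=
  scan_parcels_loop parcel_codes

-- ===== PORT B =====
def scan_parcels_alt (parcel_codes : List String) : List String :=
  let pt : List String × List String :=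
    match PySem.List.index? parcel_codes "STOP" with
    | some i => (PySem.List.slice parcel_codes none (some (i : Int)), ["Critical error: Stopping scan"])
    | none => (parcel_codes, ["All parcels scanned successfully"])
  (pt.1.map (fun c => if c == "DAMAGED" then "Skipped damaged parcel" else "Scanned parcel: " ++ c)) ++ pt.2

-- ===== PRECONDITION & SPEC =====
def Spec_scan_parcels (parcel_codes : List String) (out : List String) : Prop := out = scan_parcels_alt parcel_codes
instance (parcel_codes : List String) (out : List String) : Decidable (Spec_scan_parcels parcel_codes out) := by unfold Spec_scan_parcels; infer_instance

-- ===== CLAIM (what is proved, stated in full; the proofs are below) =====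
def Claim_equal_scan_parcels : Prop := ∀ (parcel_codes : List String), Dom_scan_parcels parcel_codes → Spec_scan_parcels parcel_codes (scan_parcels parcel_codes)

-- ===== LEMMAS AND PROOFS =====

-- ===== VERDICT (by name: the statement is the Claim_ definition above) =====
theorem alt_cons (c : String) (rest : List String) (hs : c ≠ "STOP") :
    scan_parcels_alt (c :: rest)
      = (if c == "DAMAGED" then "Skipped damaged parcel" else "Scanned parcel: " ++ c)
          :: scan_parcels_alt rest := by
  unfold scan_parcels_alt
  rw [PySem.List.index?_cons_of_ne rest hs]
  cases h2 : PySem.List.index? rest "STOP" with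
  | none => simp
  | some i =>
    have hsl : PySem.List.slice (c :: rest) none (some ((i + 1 : Nat) : Int))
        = c :: PySem.List.slice rest none (some (i : Int)) := by
      rw [PySem.List.slice_to_natCast (c :: rest) (i + 1),
        PySem.List.slice_to_natCast rest i, List.take_succ_cons]
    simp only [Option.map_some]
    rw [hsl]
    simp [PySem.List.slice_to_natCast, List.map_take]

theorem scan_parcels_eq (codes : List String) :
    scan_parcels_loop codes = scan_parcels_alt codes := by
  induction codes with
  | nil => simp [scan_parcels_loop, scan_parcels_alt]
  | cons c rest ih =>
    by_cases hs : c = "STOP"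
    · subst hs
      unfold scan_parcels_loop scan_parcels_alt
      rw [PySem.List.index?_cons_self]
      simp [PySem.List.slice]
    · rw [alt_cons c rest hs]
      by_cases hd : c = "DAMAGED"
      · simp [scan_parcels_loop, hd, ih]
      · simp [scan_parcels_loop, hd, hs, ih]

theorem scan_parcels_spec : Claim_equal_scan_parcels := by
  intro codes _
  unfold Spec_scan_parcels scan_parcels
  exact scan_parcels_eq codes
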